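-- pv_equiv track=rewrite | github.com/LibraryOfCongress/hitl | humans-in-the-loop-files/crowdsourcing-data-flow-scripts/dataflow/CS2.py | groupSubjects
-- ===== SOURCE A (Python) =====
-- def groupSubjects(segments):
--     """Group subjects by parent page mongo id"""
--     grouped = {}
--     for s in segments:
--         if s['parent_subject_id']['$oid'] in grouped:
--             grouped[s['parent_subject_id']['$oid']].append(s)
--         else:
--             grouped[s['parent_subject_id']['$oid']] = [s]
--     return grouped
-- ===== SOURCE B (Python) =====
-- def groupSubjects(segments):
--     """Group subjects by parent page mongo id"""
--     grouped = {}
--     rest = segments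
--     while rest:
--         k = rest[0]['parent_subject_id']['$oid']
--         grouped[k] = [s for s in rest
--                       if s['parent_subject_id']['$oid'] == k]
--         rest = [s for s in rest
--                 if s['parent_subject_id']['$oid'] != k]
--     return grouped
-- ===== Notes on version B (the rewrite author's own statement) =====
-- stated objective: alternative
-- what changed: B repeatedly partitions the remaining segments by the key of the first remaining segment (extract one whole group per round, recurse on the rest), instead of A's single pass that accumulates per-key lists in a dict.
import Mathlib
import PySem

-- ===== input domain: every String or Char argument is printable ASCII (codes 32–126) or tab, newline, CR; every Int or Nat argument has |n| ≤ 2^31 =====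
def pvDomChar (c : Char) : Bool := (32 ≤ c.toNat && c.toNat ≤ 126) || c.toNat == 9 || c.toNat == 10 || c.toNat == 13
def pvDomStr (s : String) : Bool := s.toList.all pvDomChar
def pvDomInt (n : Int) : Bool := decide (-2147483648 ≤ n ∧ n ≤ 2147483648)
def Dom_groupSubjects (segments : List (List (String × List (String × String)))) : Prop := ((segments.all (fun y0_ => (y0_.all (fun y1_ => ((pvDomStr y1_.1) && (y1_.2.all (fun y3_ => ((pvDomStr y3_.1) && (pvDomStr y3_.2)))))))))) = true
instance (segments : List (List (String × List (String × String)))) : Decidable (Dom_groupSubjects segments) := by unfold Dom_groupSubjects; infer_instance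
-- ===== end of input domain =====

-- B extracts one whole group per round by partitioning the remaining segments on the first
-- remaining key (recursion on the shrinking rest), instead of A's one-pass dict accumulation;
-- an alternative decomposition, not faster.


-- s['parent_subject_id']['$oid'] (none = KeyError, excluded by Pre_); shared by both ports
def segKey? (s : List (String × List (String × String))) : Option String :=
  match (PySem.Dict.mk s).get? "parent_subject_id" with
  | none => none
  | some d => (PySem.Dict.mk d).get? "$oid"

-- ===== PORT A =====
-- the 'none' branch (a KeyError in Python) is outside Pre_; the loop skips such a segment
def groupSubjects (segments : List (List (String × List (String × String)))) : List (String × List (List (String × List (String × String)))) :=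
  (segments.foldl (fun grouped s =>
      match segKey? s with
      | none => grouped
      | some k =>
        if grouped.contains k then grouped.modify k [] (· ++ [s])
        else grouped.insert k [s])
    PySem.Dict.empty).items

-- ===== PORT B =====
-- Source B's while loop over 'rest' as recursion on the shrinking rest; the 'none' branch
-- (a KeyError in Python) is outside Pre_ and stops the loop
def pvGroupLoop (rest : List (List (String × List (String × String)))) : List (String × List (List (String × List (String × String)))) :=
  match rest with
  | [] => []
  | s :: tl =>
    match h : segKey? s with
    | none => []
    | some k =>
      (k, (s :: tl).filter (fun t => segKey? t == some k)) ::
        pvGroupLoop ((s :: tl).filter (fun t => !(segKey? t == some k)))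
termination_by rest.length
decreasing_by
  simp only [List.filter_cons, h, beq_self_eq_true, Bool.not_true, List.length_cons]
  exact Nat.lt_succ_of_le (List.length_filter_le _ tl)

def groupSubjects_alt (segments : List (List (String × List (String × String)))) : List (String × List (List (String × List (String × String)))) :=
  pvGroupLoop segments

-- ===== PRECONDITION & SPEC =====
-- Pre_ excludes exactly the segments on which A raises KeyError (missing 'parent_subject_id' or '$oid')
def Pre_groupSubjects (segments : List (List (String × List (String × String)))) : Prop :=
  ∀ s ∈ segments, (segKey? s).isSome = true
instance (segments : List (List (String × List (String × String)))) : Decidable (Pre_groupSubjects segments) := by unfold Pre_groupSubjects; infer_instance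
def pvWitness_groupSubjects : (List (List (String × List (String × String)))) :=
  [[("parent_subject_id", [("$oid", "a")])], [("parent_subject_id", [("$oid", "b")]), ("x", [])]]
def Spec_groupSubjects (segments : List (List (String × List (String × String)))) (out : List (String × List (List (String × List (String × String))))) : Prop := out = groupSubjects_alt segments
instance (segments : List (List (String × List (String × String)))) (out : List (String × List (List (String × List (String × String))))) : Decidable (Spec_groupSubjects segments out) := by
  unfold Spec_groupSubjects
  have d1 : DecidableEq (List (String × List (String × String))) := inferInstance
  have d2 : DecidableEq (List (List (String × List (String × String)))) := @instDecidableEqList _ d1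
  have d3 : DecidableEq (String × List (List (String × List (String × String)))) :=
    @instDecidableEqProd String (List (List (String × List (String × String)))) inferInstance d2
  exact @instDecidableEqList _ d3 out (groupSubjects_alt segments)

-- ===== CLAIM (what is proved, stated in full; the proofs are below) =====
def Claim_equal_groupSubjects : Prop := ∀ (segments : List (List (String × List (String × String)))), Dom_groupSubjects segments → Pre_groupSubjects segments → Spec_groupSubjects segments (groupSubjects segments)

-- ===== LEMMAS AND PROOFS =====
abbrev PVSeg := List (String × List (String × String))

def pvStepA (g : PySem.Dict String (List PVSeg)) (s : PVSeg) : PySem.Dict String (List PVSeg) :=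
  match segKey? s with
  | none => g
  | some k => if g.contains k then g.modify k [] (· ++ [s]) else g.insert k [s]

-- first-seen key accumulation: the key order of A's dict
def pvStepK (ks : List String) (s : PVSeg) : List String :=
  match segKey? s with
  | none => ks
  | some k => if k ∈ ks then ks else ks ++ [k]

theorem pvMem_stepK (ks : List String) (s : PVSeg) (x : String) :
    x ∈ pvStepK ks s ↔ x ∈ ks ∨ segKey? s = some x := by
  unfold pvStepK
  cases h : segKey? s with
  | none => simp
  | some k =>
    by_cases hk : k ∈ ks
    · simp only [if_pos hk]
      constructor
      · exact fun hx => Or.inl hx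
      · rintro (hx | hx)
        · exact hx
        · cases hx; exact hk
    · simp only [if_neg hk, List.mem_append, List.mem_singleton]
      constructor
      · rintro (hx | hx)
        · exact Or.inl hx
        · exact Or.inr (by rw [hx])
      · rintro (hx | hx)
        · exact Or.inl hx
        · injection hx with hx; exact Or.inr hx.symm

theorem pvMem_keys (xs : List PVSeg) (ks : List String) (x : String) :
    x ∈ xs.foldl pvStepK ks ↔ x ∈ ks ∨ ∃ s ∈ xs, segKey? s = some x := by
  induction xs generalizing ks with
  | nil => simp
  | cons s xs ih =>
    simp only [List.foldl_cons, ih, pvMem_stepK, List.mem_cons]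
    constructor
    · rintro ((h | h) | ⟨t, ht, hk⟩)
      · exact Or.inl h
      · exact Or.inr ⟨s, Or.inl rfl, h⟩
      · exact Or.inr ⟨t, Or.inr ht, hk⟩
    · rintro (h | ⟨t, (rfl | ht), hk⟩)
      · exact Or.inl (Or.inl h)
      · exact Or.inl (Or.inr hk)
      · exact Or.inr ⟨t, ht, hk⟩

theorem pvNodup_keys (xs : List PVSeg) (ks : List String) (h : ks.Nodup) :
    (xs.foldl pvStepK ks).Nodup := by
  induction xs generalizing ks with
  | nil => exact h
  | cons s xs ih =>
    refine ih _ ?_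
    unfold pvStepK
    cases segKey? s with
    | none => exact h
    | some k =>
      by_cases hk : k ∈ ks
      · simpa [hk] using h
      · simp only [if_neg hk]
        exact List.Nodup.append h (List.nodup_singleton k) (by simpa using hk)

theorem pvContains_mk_map {α : Type} (K : List String) (f : String → α) (k : String) :
    (PySem.Dict.mk (K.map (fun k' => (k', f k')))).contains k = decide (k ∈ K) := by
  rw [Bool.eq_iff_iff]
  simp only [PySem.Dict.contains, List.any_eq_true, List.mem_map, decide_eq_true_eq, beq_iff_eq]
  constructor
  · rintro ⟨p, ⟨x, hx, rfl⟩, hpk⟩; simpa [← hpk] using hx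
  · exact fun hk => ⟨(k, f k), ⟨k, hk, rfl⟩, rfl⟩

theorem pvGet?_mk_map {α : Type} (K : List String) (f : String → α) (k : String)
    (hk : k ∈ K) (hnd : K.Nodup) :
    (PySem.Dict.mk (K.map (fun k' => (k', f k')))).get? k = some (f k) := by
  induction K with
  | nil => cases hk
  | cons a K ih =>
    by_cases ha : a = k
    · subst ha; simp [PySem.Dict.get?]
    · have hne : ¬ (((a, f a)).1 == k) = true := by simpa using ha
      have hk' : k ∈ K := (List.mem_cons.mp hk).resolve_left (fun h => ha h.symm)
      have hih := ih hk' hnd.of_cons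
      simp only [PySem.Dict.get?, List.map_cons] at hih ⊢
      rw [List.find?_cons_of_neg (p := fun p : String × α => p.1 == k) (l := List.map (fun k' => (k', f k')) K) hne]
      exact hih

-- A's dict, as an association list, is the first-seen keys paired with their filters
theorem pvInvariant (xs : List PVSeg) (h : ∀ s ∈ xs, (segKey? s).isSome = true) :
    (xs.foldl pvStepA PySem.Dict.empty).items
      = (xs.foldl pvStepK []).map
          (fun k => (k, xs.filter (fun s => segKey? s == some k))) := by
  induction xs using List.reverseRecOn with
  | nil => rfl
  | append_singleton xs s ih =>
    have hxs : ∀ t ∈ xs, (segKey? t).isSome = true := fun t ht => h t (by simp [ht])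
    have hs : (segKey? s).isSome = true := h s (by simp)
    obtain ⟨k, hk⟩ : ∃ k, segKey? s = some k := by
      cases hsk : segKey? s with
      | none => rw [hsk] at hs; cases hs
      | some k => exact ⟨k, rfl⟩
    have ih' := ih hxs
    set K := xs.foldl pvStepK [] with hK
    have hndK : K.Nodup := pvNodup_keys xs [] List.nodup_nil
    rw [List.foldl_append, List.foldl_append]
    simp only [List.foldl_cons, List.foldl_nil]
    have hA : ∀ g : PySem.Dict String (List PVSeg), pvStepA g s
        = if g.contains k then g.modify k [] (· ++ [s]) else g.insert k [s] := by
      intro g; unfold pvStepA; rw [hk]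
    have hKs : ∀ ks : List String, pvStepK ks s = if k ∈ ks then ks else ks ++ [k] := by
      intro ks; unfold pvStepK; rw [hk]
    rw [hA, hKs]
    have hfilter : ∀ k' : String, (xs ++ [s]).filter (fun t => segKey? t == some k')
        = xs.filter (fun t => segKey? t == some k') ++ (if k' = k then [s] else []) := by
      intro k'
      rw [List.filter_append, List.filter_singleton]
      by_cases hkk : k' = k
      · subst hkk; simp [hk]
      · have hb : (segKey? s == some k') = false := by
          simp only [hk]
          simpa using fun he => hkk he.symm
        simp [hb, hkk]
    by_cases hmem : k ∈ K
    · rw [if_pos hmem]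
      have hcontains : (xs.foldl pvStepA PySem.Dict.empty).contains k = true := by
        have : (xs.foldl pvStepA PySem.Dict.empty).contains k
            = decide (k ∈ K) := by
          rw [show (xs.foldl pvStepA PySem.Dict.empty) =
              PySem.Dict.mk (K.map (fun k' => (k', xs.filter (fun t => segKey? t == some k')))) from
            congrArg PySem.Dict.mk ih']
          exact pvContains_mk_map K _ k
        rw [this]; simpa using hmem
      rw [if_pos hcontains]
      have hget : (xs.foldl pvStepA PySem.Dict.empty).getD k []
          = xs.filter (fun t => segKey? t == some k) := by
        have := pvGet?_mk_map K (fun k' => xs.filter (fun t => segKey? t == some k')) k hmem hndK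
        rw [show (xs.foldl pvStepA PySem.Dict.empty) =
            PySem.Dict.mk (K.map (fun k' => (k', xs.filter (fun t => segKey? t == some k')))) from
          congrArg PySem.Dict.mk ih']
        simp [PySem.Dict.getD, this]
      unfold PySem.Dict.modify
      rw [hget]
      unfold PySem.Dict.insert
      rw [hcontains]
      rw [show (xs.foldl pvStepA PySem.Dict.empty).items
          = K.map (fun k' => (k', xs.filter (fun t => segKey? t == some k'))) from ih']
      rw [List.map_map]
      apply List.map_congr_left
      intro k' _
      simp only [Function.comp]
      by_cases hkk : k' = k
      · subst hkk
        simp [hfilter k']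
      · have : (k' == k) = false := by simpa using hkk
        simp [this, hfilter k', hkk]
    · rw [if_neg hmem]
      have hcontains : (xs.foldl pvStepA PySem.Dict.empty).contains k = false := by
        have : (xs.foldl pvStepA PySem.Dict.empty).contains k = decide (k ∈ K) := by
          rw [show (xs.foldl pvStepA PySem.Dict.empty) =
              PySem.Dict.mk (K.map (fun k' => (k', xs.filter (fun t => segKey? t == some k')))) from
            congrArg PySem.Dict.mk ih']
          exact pvContains_mk_map K _ k
        rw [this]; simpa using hmem
      unfold PySem.Dict.insert
      rw [hcontains]
      simp only [Bool.false_eq_true, if_false]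
      rw [List.map_append, ih', List.map_singleton]
      congr 1
      · apply List.map_congr_left
        intro k' hk'
        have hkk : k' ≠ k := fun he => hmem (he ▸ hk')
        simp [hfilter k', hkk]
      · have hempty : xs.filter (fun t => segKey? t == some k) = [] := by
          rw [List.filter_eq_nil_iff]
          intro t ht hkt
          apply hmem
          rw [hK, pvMem_keys]
          exact Or.inr ⟨t, ht, by simpa using hkt⟩
        simp [hfilter k, hempty]

-- dropping segments whose key is already in ks does not change the accumulated key list
theorem pvKeys_filter_mem (xs : List PVSeg) (ks : List String) (k : String) (hk : k ∈ ks) :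
    (xs.filter (fun t => !(segKey? t == some k))).foldl pvStepK ks = xs.foldl pvStepK ks := by
  induction xs generalizing ks with
  | nil => rfl
  | cons s xs ih =>
    have hk' : k ∈ pvStepK ks s := (pvMem_stepK ks s k).mpr (Or.inl hk)
    by_cases hs : segKey? s = some k
    · have hstep : pvStepK ks s = ks := by unfold pvStepK; simp [hs, hk]
      simp only [List.filter_cons, hs, beq_self_eq_true, Bool.not_true, List.foldl_cons, hstep]
      exact ih ks hk
    · have hb : (segKey? s == some k) = false := by simpa using hs
      simp only [List.filter_cons, hb, Bool.not_false, List.foldl_cons]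
      exact ih (pvStepK ks s) hk'

-- a key no segment carries stays at the front of the accumulated key list
theorem pvKeys_cons (xs : List PVSeg) (ks : List String) (a : String)
    (h : ∀ t ∈ xs, segKey? t ≠ some a) :
    xs.foldl pvStepK (a :: ks) = a :: xs.foldl pvStepK ks := by
  induction xs generalizing ks with
  | nil => rfl
  | cons s xs ih =>
    have hstep : pvStepK (a :: ks) s = a :: pvStepK ks s := by
      unfold pvStepK
      cases hsk : segKey? s with
      | none => rfl
      | some k =>
        have hka : k ≠ a := fun he => h s (List.mem_cons_self ..) (he ▸ hsk)
        by_cases hmem : k ∈ ks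
        · simp [hmem, hka]
        · have : k ∉ a :: ks := by simp [hka, hmem]
          simp [hmem, this]
    simp only [List.foldl_cons, hstep]
    exact ih (pvStepK ks s) (fun t ht => h t (List.mem_cons_of_mem _ ht))

-- B's partition recursion also computes first-seen keys paired with their filters
theorem pvGroupLoop_eq (xs : List PVSeg) (h : ∀ s ∈ xs, (segKey? s).isSome = true) :
    pvGroupLoop xs
      = (xs.foldl pvStepK []).map
          (fun k => (k, xs.filter (fun s => segKey? s == some k))) := by
  induction xs using pvGroupLoop.induct with
  | case1 => simp [pvGroupLoop]
  | case2 s tl hnone =>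
    exact absurd (h s (List.mem_cons_self ..)) (by simp [hnone])
  | case3 s tl k hk ih =>
    rw [pvGroupLoop]
    split
    · next heq => rw [heq] at hk; cases hk
    · next k0 heq =>
      rw [heq] at hk
      injection hk with hk
      subst hk
      set xs' := (s :: tl).filter (fun t => !(segKey? t == some k0)) with hxs'
      have hxs'sub : ∀ t ∈ xs', t ∈ s :: tl := fun t ht => (List.mem_filter.mp ht).1
      have hxs'key : ∀ t ∈ xs', segKey? t ≠ some k0 := by
        intro t ht he
        have := (List.mem_filter.mp ht).2
        simp [he] at this
      have ih' := ih (fun t ht => h t (hxs'sub t ht))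
      -- key list of s::tl is k0 :: key list of xs'
      have hkeys : (s :: tl).foldl pvStepK [] = k0 :: xs'.foldl pvStepK [] := by
        have h1 : (s :: tl).foldl pvStepK [] = tl.foldl pvStepK [k0] := by
          simp only [List.foldl_cons]
          congr 1
          unfold pvStepK; rw [heq]; simp
        have h2 : tl.foldl pvStepK [k0]
            = (tl.filter (fun t => !(segKey? t == some k0))).foldl pvStepK [k0] :=
          (pvKeys_filter_mem tl [k0] k0 (by simp)).symm
        have h3 : xs' = tl.filter (fun t => !(segKey? t == some k0)) := by
          rw [hxs', List.filter_cons]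
          simp [heq]
        have h4 : (tl.filter (fun t => !(segKey? t == some k0))).foldl pvStepK [k0]
            = k0 :: (tl.filter (fun t => !(segKey? t == some k0))).foldl pvStepK [] := by
          apply pvKeys_cons
          intro t ht he
          have := (List.mem_filter.mp ht).2
          simp [he] at this
        rw [h1, h2, h4, h3]
      rw [hkeys, List.map_cons, ih']
      congr 1
      apply List.map_congr_left
      intro k' hk'
      have hk'ne : k' ≠ k0 := by
        rcases (pvMem_keys xs' [] k').mp hk' with h0 | ⟨t, ht, hkt⟩
        · cases h0
        · exact fun he => hxs'key t ht (he ▸ hkt)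
      congr 1
      rw [hxs', List.filter_filter]
      apply List.filter_congr
      intro t _
      cases segKey? t with
      | none => simp
      | some m =>
        by_cases hm : m = k'
        · subst hm; simp [hk'ne]
        · simp [hm]

-- ===== VERDICT (by name: the statement is the Claim_ definition above) =====
theorem groupSubjects_spec : Claim_equal_groupSubjects := by
  intro segments _ hpre
  unfold Spec_groupSubjects groupSubjects_alt
  have hA : groupSubjects segments = (segments.foldl pvStepA PySem.Dict.empty).items := rfl
  rw [hA, pvInvariant segments hpre, pvGroupLoop_eq segments hpre]
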